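-- pv_equiv track=rewrite | github.com/CardinisCode/learning-python | finalproblems/finalproblem10.py | process_row_case_switch_for_encryption
-- ===== SOURCE A (Python) =====
-- CIPHER = (("D", "A", "V", "I", "O"),
--           ("Y", "N", "E", "R", "B"),
--           ("C", "F", "G", "H", "K"),
--           ("L", "M", "P", "Q", "S"),
--           ("T", "U", "W", "X", "Z"))
--
-- def process_row_case_switch_for_encryption(character_pair):
--     updated_pair = ""
--     first_letter = character_pair[0]
--     second_letter = character_pair[1]
--
--     for index_row in range(0, len(CIPHER)):
--         current_row = CIPHER[index_row]
--         for index_column in range(0, len(current_row)):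
--             current_letter = current_row[index_column]
--             if current_letter == first_letter:
--                 cipher_letter = CIPHER[index_row][(index_column +1) % 5]
--                 updated_pair += cipher_letter
--
--     for index_row in range(0, len(CIPHER)):
--         current_row = CIPHER[index_row]
--         for index_column in range(0, len(current_row)):
--             current_letter = current_row[index_column]
--
--             if current_letter == second_letter:
--                 if index_column == len(current_row)-1:
--                     cipher_letter = CIPHER[index_row][0]
--                 else:
--                     cipher_letter = CIPHER[index_row][(index_column +1) % 5]
--                 updated_pair += cipher_letter
--
--     return updated_pair
-- ===== SOURCE B (Python) =====
-- # Table-driven re-implementation: precompute a letter->letter substitution map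
-- # by zipping each row with its left-rotation; encryption is two dict lookups.
-- CIPHER = (("D", "A", "V", "I", "O"),
--           ("Y", "N", "E", "R", "B"),
--           ("C", "F", "G", "H", "K"),
--           ("L", "M", "P", "Q", "S"),
--           ("T", "U", "W", "X", "Z"))
--
-- ENCRYPT_MAP = {}
-- for _row in CIPHER:
--     for _plain, _cipher in zip(_row, _row[1:] + _row[:1]):
--         ENCRYPT_MAP[_plain] = _cipher
--
-- def process_row_case_switch_for_encryption(character_pair):
--     first, second = character_pair[0], character_pair[1]
--     return ENCRYPT_MAP.get(first, "") + ENCRYPT_MAP.get(second, "")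
-- ===== Notes on version B (the rewrite author's own statement) =====
-- stated objective: simpler
-- what changed: B precomputes a letter-to-letter substitution dictionary once, by zipping each grid row with its left-rotation, so encryption is two dict lookups with no scan or index arithmetic at call time.
import Mathlib
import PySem

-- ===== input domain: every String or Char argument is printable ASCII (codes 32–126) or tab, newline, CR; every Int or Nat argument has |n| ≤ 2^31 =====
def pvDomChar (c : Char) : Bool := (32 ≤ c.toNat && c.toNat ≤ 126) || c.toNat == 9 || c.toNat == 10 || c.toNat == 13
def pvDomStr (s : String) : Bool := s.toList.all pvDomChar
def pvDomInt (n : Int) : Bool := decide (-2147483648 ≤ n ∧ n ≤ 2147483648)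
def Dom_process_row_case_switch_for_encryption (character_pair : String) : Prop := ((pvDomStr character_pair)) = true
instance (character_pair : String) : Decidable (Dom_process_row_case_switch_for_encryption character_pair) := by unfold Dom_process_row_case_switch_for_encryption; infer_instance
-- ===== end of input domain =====

-- B precomputes a letter->letter substitution table by zipping each row of the
-- grid with its left-rotation; encryption is two table lookups (objective: simpler).


-- ===== PORT A =====
-- CIPHER: Python's 1-character strings are ported as Char (exact: all comparisons
-- and concatenations in A involve only 1-character strings).
def pvCipher : List (List Char) :=
  [['D','A','V','I','O'], ['Y','N','E','R','B'], ['C','F','G','H','K'],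
   ['L','M','P','Q','S'], ['T','U','W','X','Z']]

-- first loop of A: for index_row in range(0,5): for index_column in range(0,len(row)): ...
def pvLoop1 (first_letter : Char) (acc : List Char) : List Char :=
  (PySem.List.pyRange 0 5 1).foldl (fun acc index_row =>
    let current_row := PySem.List.pyGetD pvCipher index_row []
    (PySem.List.pyRange 0 (current_row.length : Int) 1).foldl (fun acc index_column =>
      let current_letter := PySem.List.pyGetD current_row index_column ' '
      if current_letter == first_letter then
        acc ++ [PySem.List.pyGetD (PySem.List.pyGetD pvCipher index_row [])
                  (PySem.Int.mod (index_column + 1) 5) ' ']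
      else acc) acc) acc

-- second loop of A, with its extra last-column branch
def pvLoop2 (second_letter : Char) (acc : List Char) : List Char :=
  (PySem.List.pyRange 0 5 1).foldl (fun acc index_row =>
    let current_row := PySem.List.pyGetD pvCipher index_row []
    (PySem.List.pyRange 0 (current_row.length : Int) 1).foldl (fun acc index_column =>
      let current_letter := PySem.List.pyGetD current_row index_column ' '
      if current_letter == second_letter then
        if index_column == (current_row.length : Int) - 1 then
          acc ++ [PySem.List.pyGetD pvCipher index_row [] |>.headD ' ']
        else
          acc ++ [PySem.List.pyGetD (PySem.List.pyGetD pvCipher index_row [])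
                    (PySem.Int.mod (index_column + 1) 5) ' ']
      else acc) acc) acc

def process_row_case_switch_for_encryption (character_pair : String) : String :=
  match PySem.Str.pyGet? character_pair 0, PySem.Str.pyGet? character_pair 1 with
  | some first_letter, some second_letter =>
      String.ofList (pvLoop2 second_letter (pvLoop1 first_letter []))
  | _, _ => ""   -- IndexError in Python: excluded by Pre_

-- ===== PORT B =====
-- Source B's own CIPHER tuple (same grid literal as A's module constant)
def pvCipherB : List (List Char) :=
  [['D','A','V','I','O'], ['Y','N','E','R','B'], ['C','F','G','H','K'],
   ['L','M','P','Q','S'], ['T','U','W','X','Z']]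

-- ENCRYPT_MAP: for _row in CIPHER: for _plain, _cipher in zip(_row, _row[1:] + _row[:1]): ...
def pvEncryptMap : PySem.Dict Char Char :=
  pvCipherB.foldl (fun d row =>
    (List.zip row (PySem.List.slice row (some 1) none ++ PySem.List.slice row none (some 1))).foldl
      (fun d pc => d.insert pc.1 pc.2) d) PySem.Dict.empty

-- ENCRYPT_MAP.get(c, "") as a character list ("" = [], one-char string = [x])
def pvMapGet (c : Char) : List Char :=
  match PySem.Dict.get? pvEncryptMap c with
  | some x => [x]
  | none => []

def process_row_case_switch_for_encryption_alt (character_pair : String) : String :=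
  match PySem.Str.pyGet? character_pair 0 with
  | none => ""   -- IndexError in Python: excluded by Pre_
  | some first =>
    match PySem.Str.pyGet? character_pair 1 with
    | none => ""   -- IndexError in Python: excluded by Pre_
    | some second => String.ofList (pvMapGet first ++ pvMapGet second)

-- ===== PRECONDITION & SPEC =====
-- A raises IndexError on strings of length < 2 (character_pair[0] / [1]); these are excluded.
def Pre_process_row_case_switch_for_encryption (character_pair : String) : Prop :=
  2 ≤ character_pair.toList.length
instance (character_pair : String) : Decidable (Pre_process_row_case_switch_for_encryption character_pair) := by unfold Pre_process_row_case_switch_for_encryption; infer_instance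
def pvWitness_process_row_case_switch_for_encryption : String := "DA"

def Spec_process_row_case_switch_for_encryption (character_pair : String) (out : String) : Prop := out = process_row_case_switch_for_encryption_alt character_pair
instance (character_pair : String) (out : String) : Decidable (Spec_process_row_case_switch_for_encryption character_pair out) := by unfold Spec_process_row_case_switch_for_encryption; infer_instance

-- ===== CLAIM (what is proved, stated in full; the proofs are below) =====
def Claim_equal_process_row_case_switch_for_encryption : Prop := ∀ (character_pair : String), Dom_process_row_case_switch_for_encryption character_pair → Pre_process_row_case_switch_for_encryption character_pair → Spec_process_row_case_switch_for_encryption character_pair (process_row_case_switch_for_encryption character_pair)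

-- ===== LEMMAS AND PROOFS =====

-- the 25 grid letters (proof-side case split only)
def pvLetters : List Char :=
  ['D','A','V','I','O','Y','N','E','R','B','C','F','G','H','K','L','M','P','Q','S','T','U','W','X','Z']

-- shape of A's second loop (two-way branch inside the conditional append)
theorem pv_foldl_two_if {α β : Type} (p q : β → Bool) (f g : β → α) (l : List β) (acc : List α) :
    l.foldl (fun acc x => if p x then (if q x then acc ++ [f x] else acc ++ [g x]) else acc) acc
      = acc ++ l.flatMap (fun x => if p x then (if q x then [f x] else [g x]) else []) := by
  induction l generalizing acc with
  | nil => simp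
  | cons x xs ih =>
    simp only [List.foldl_cons, List.flatMap_cons, ih]
    by_cases hp : p x <;> by_cases hq : q x <;> simp [hp, hq]

theorem pvLoop1_acc (c : Char) (acc : List Char) : pvLoop1 c acc = acc ++ pvLoop1 c [] := by
  simp only [pvLoop1, PySem.List.foldl_append_if, PySem.List.foldl_append_eq_flatMap]
  simp

theorem pvLoop2_acc (c : Char) (acc : List Char) : pvLoop2 c acc = acc ++ pvLoop2 c [] := by
  simp only [pvLoop2, pv_foldl_two_if, PySem.List.foldl_append_eq_flatMap]
  simp

theorem pvMapGet_none (c : Char) (hc : c ∉ pvLetters) : pvMapGet c = [] := by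
  simp only [pvLetters, List.mem_cons, List.not_mem_nil, or_false, not_or] at hc
  obtain ⟨h1,h2,h3,h4,h5,h6,h7,h8,h9,h10,h11,h12,h13,h14,h15,h16,h17,h18,h19,h20,h21,h22,h23,h24,h25⟩ := hc
  simp [pvMapGet, show pvEncryptMap = PySem.Dict.mk
      [('D','A'),('A','V'),('V','I'),('I','O'),('O','D'),
       ('Y','N'),('N','E'),('E','R'),('R','B'),('B','Y'),
       ('C','F'),('F','G'),('G','H'),('H','K'),('K','C'),
       ('L','M'),('M','P'),('P','Q'),('Q','S'),('S','L'),
       ('T','U'),('U','W'),('W','X'),('X','Z'),('Z','T')] from by decide,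
    PySem.Dict.get?_mk_cons, PySem.Dict.get?, Ne.symm h1, Ne.symm h2, Ne.symm h3, Ne.symm h4, Ne.symm h5,
    Ne.symm h6, Ne.symm h7, Ne.symm h8, Ne.symm h9, Ne.symm h10, Ne.symm h11, Ne.symm h12,
    Ne.symm h13, Ne.symm h14, Ne.symm h15, Ne.symm h16, Ne.symm h17, Ne.symm h18, Ne.symm h19,
    Ne.symm h20, Ne.symm h21, Ne.symm h22, Ne.symm h23, Ne.symm h24, Ne.symm h25]

theorem pvLoop1_eq (c : Char) (acc : List Char) : pvLoop1 c acc = acc ++ pvMapGet c := by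
  rw [pvLoop1_acc]
  by_cases hc : c ∈ pvLetters
  · simp only [pvLetters, List.mem_cons, List.not_mem_nil, or_false] at hc
    rcases hc with rfl|rfl|rfl|rfl|rfl|rfl|rfl|rfl|rfl|rfl|rfl|rfl|rfl|rfl|rfl|rfl|rfl|rfl|rfl|rfl|rfl|rfl|rfl|rfl|rfl
    all_goals exact congrArg (acc ++ ·) (by decide)
  · have hloop : pvLoop1 c [] = [] := by
      have hc' := hc
      simp only [pvLetters, List.mem_cons, List.not_mem_nil, or_false, not_or] at hc'
      obtain ⟨h1,h2,h3,h4,h5,h6,h7,h8,h9,h10,h11,h12,h13,h14,h15,h16,h17,h18,h19,h20,h21,h22,h23,h24,h25⟩ := hc'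
      simp only [pvLoop1, PySem.List.foldl_append_if, PySem.List.foldl_append_eq_flatMap]
      simp [pvCipher, PySem.List.pyGetD, PySem.List.pyGet?, PySem.List.pyIdx?,
        show PySem.List.pyRange 0 5 1 = [0,1,2,3,4] from by decide,
        Ne.symm h1, Ne.symm h2, Ne.symm h3, Ne.symm h4, Ne.symm h5, Ne.symm h6, Ne.symm h7,
        Ne.symm h8, Ne.symm h9, Ne.symm h10, Ne.symm h11, Ne.symm h12, Ne.symm h13, Ne.symm h14,
        Ne.symm h15, Ne.symm h16, Ne.symm h17, Ne.symm h18, Ne.symm h19, Ne.symm h20,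
        Ne.symm h21, Ne.symm h22, Ne.symm h23, Ne.symm h24, Ne.symm h25]
    rw [hloop, pvMapGet_none c hc]

theorem pvLoop2_eq (c : Char) (acc : List Char) : pvLoop2 c acc = acc ++ pvMapGet c := by
  rw [pvLoop2_acc]
  by_cases hc : c ∈ pvLetters
  · simp only [pvLetters, List.mem_cons, List.not_mem_nil, or_false] at hc
    rcases hc with rfl|rfl|rfl|rfl|rfl|rfl|rfl|rfl|rfl|rfl|rfl|rfl|rfl|rfl|rfl|rfl|rfl|rfl|rfl|rfl|rfl|rfl|rfl|rfl|rfl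
    all_goals exact congrArg (acc ++ ·) (by decide)
  · have hloop : pvLoop2 c [] = [] := by
      have hc' := hc
      simp only [pvLetters, List.mem_cons, List.not_mem_nil, or_false, not_or] at hc'
      obtain ⟨h1,h2,h3,h4,h5,h6,h7,h8,h9,h10,h11,h12,h13,h14,h15,h16,h17,h18,h19,h20,h21,h22,h23,h24,h25⟩ := hc'
      simp only [pvLoop2, pv_foldl_two_if, PySem.List.foldl_append_eq_flatMap]
      simp [pvCipher, PySem.List.pyGetD, PySem.List.pyGet?, PySem.List.pyIdx?,
        show PySem.List.pyRange 0 5 1 = [0,1,2,3,4] from by decide,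
        Ne.symm h1, Ne.symm h2, Ne.symm h3, Ne.symm h4, Ne.symm h5, Ne.symm h6, Ne.symm h7,
        Ne.symm h8, Ne.symm h9, Ne.symm h10, Ne.symm h11, Ne.symm h12, Ne.symm h13, Ne.symm h14,
        Ne.symm h15, Ne.symm h16, Ne.symm h17, Ne.symm h18, Ne.symm h19, Ne.symm h20,
        Ne.symm h21, Ne.symm h22, Ne.symm h23, Ne.symm h24, Ne.symm h25]
    rw [hloop, pvMapGet_none c hc]

-- ===== VERDICT (by name: the statement is the Claim_ definition above) =====
theorem process_row_case_switch_for_encryption_spec : Claim_equal_process_row_case_switch_for_encryption := by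
  intro s _ hpre
  unfold Pre_process_row_case_switch_for_encryption at hpre
  unfold Spec_process_row_case_switch_for_encryption
  unfold process_row_case_switch_for_encryption process_row_case_switch_for_encryption_alt
  rcases hlist : s.toList with _ | ⟨c1, _ | ⟨c2, rest⟩⟩
  · simp [hlist] at hpre
  · simp [hlist] at hpre
  · simp only [PySem.Str.pyGet?_eq, PySem.Chars.pyGet?_eq_listPyGet?, hlist]
    have h0 : PySem.List.pyGet? (c1 :: c2 :: rest) 0 = some c1 := by
      simp [PySem.List.pyGet?, PySem.List.pyIdx?,
        show (0:Int) ≤ (rest.length:Int) + 1 by positivity]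
    have h1 : PySem.List.pyGet? (c1 :: c2 :: rest) 1 = some c2 := by
      simp [PySem.List.pyGet?, PySem.List.pyIdx?]
    rw [h0, h1]
    simp only []
    rw [pvLoop1_eq, pvLoop2_eq]
    simp
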